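-- pv_equiv track=rewrite | github.com/Kodsport/sakerhetssm-wargame-problem | crate-ctf/2022/forensics/PassarBast/ctf_create_bitmap.py | get_sorted_alloc_list
-- ===== SOURCE A (Python) =====
-- import sys, random, os, time, struct, argparse, itertools, bitarray
--
-- def get_sorted_alloc_list(current_bitarray):
--     alloc = []
--     for k, g in itertools.groupby(enumerate(current_bitarray), lambda x : x[1] == 1):
--         if k:
--             temp = list(g)
--             alloc.append([temp[0][0], len(temp)])
--     alloc.sort(key=lambda x : x[1], reverse=True)
--     return alloc
-- ===== SOURCE B (Python) =====
-- def get_sorted_alloc_list(current_bitarray):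
--     # Boundary detection: a run starts where the bit is 1 and its left neighbour
--     # is not, and ends where the bit is 1 and its right neighbour is not; the
--     # k-th start pairs with the k-th end.
--     prev = [0] + current_bitarray[:-1]
--     nxt = current_bitarray[1:] + [0]
--     starts = [i for i, (b, p) in enumerate(zip(current_bitarray, prev)) if b == 1 and p != 1]
--     ends = [i for i, (b, x) in enumerate(zip(current_bitarray, nxt)) if b == 1 and x != 1]
--     alloc = [[s, e - s + 1] for s, e in zip(starts, ends)]
--     alloc.sort(key=lambda x: x[1], reverse=True)
--     return alloc
-- ===== Notes on version B (the rewrite author's own statement) =====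
-- stated objective: alternative
-- what changed: Replaces the sequential run scan (itertools.groupby with per-group list materialisation) by boundary detection: run starts (bit 1 with left neighbour not 1) and run ends (bit 1 with right neighbour not 1) are found by comparing the list against shifted copies of itself and zipped together; the stable descending sort by length is kept.
import Mathlib
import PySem

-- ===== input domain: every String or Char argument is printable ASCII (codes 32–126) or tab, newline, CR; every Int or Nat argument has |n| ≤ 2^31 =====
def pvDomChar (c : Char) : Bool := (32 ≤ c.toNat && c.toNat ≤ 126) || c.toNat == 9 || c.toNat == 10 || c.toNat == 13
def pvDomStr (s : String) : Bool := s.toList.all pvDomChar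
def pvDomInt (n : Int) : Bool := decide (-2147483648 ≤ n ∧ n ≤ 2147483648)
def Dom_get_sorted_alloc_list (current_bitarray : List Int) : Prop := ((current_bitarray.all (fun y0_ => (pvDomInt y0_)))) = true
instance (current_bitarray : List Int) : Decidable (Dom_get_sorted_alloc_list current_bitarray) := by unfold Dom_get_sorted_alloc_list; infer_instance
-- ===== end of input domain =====

-- B replaces the sequential run scan (itertools.groupby) by boundary detection on
-- shifted copies of the list: run starts (bit 1, left neighbour not 1) are zipped
-- with run ends (bit 1, right neighbour not 1); same stable descending sort (objective: alternative).

-- ===== PORT A =====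
-- itertools.groupby(enumerate(xs), key = lambda x: x[1] == 1): maximal consecutive equal-key groups
def pvGroupsA (xs : List (Int × Int)) : List (Bool × List (Int × Int)) :=
  match xs with
  | [] => []
  | x :: rest =>
    let k := x.2 == 1
    (k, x :: rest.takeWhile (fun y => (y.2 == 1) == k)) ::
      pvGroupsA (rest.dropWhile (fun y => (y.2 == 1) == k))
termination_by xs.length
decreasing_by
  simp only [List.length_cons]
  exact Nat.lt_succ_of_le (List.length_dropWhile_le _ _)

def get_sorted_alloc_list (current_bitarray : List Int) : List (List Int) :=
  -- for k, g in groupby(...): if k: temp = list(g); alloc.append([temp[0][0], len(temp)])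
  let alloc := (pvGroupsA (PySem.List.enumerate current_bitarray 0)).foldl
    (fun acc kg =>
      if kg.1 then acc ++ [[(PySem.List.pyGetD kg.2 0 (0, 0)).1, (kg.2.length : Int)]]
      else acc) []
  PySem.List.sorted alloc (fun x => PySem.List.pyGetD x 1 0) true

-- ===== PORT B =====
def get_sorted_alloc_list_alt (current_bitarray : List Int) : List (List Int) :=
  let prev := 0 :: PySem.List.slice current_bitarray none (some (-1))   -- [0] + xs[:-1]
  let nxt := PySem.List.slice current_bitarray (some 1) none ++ [0]     -- xs[1:] + [0]
  let starts := ((PySem.List.enumerate (current_bitarray.zip prev) 0).filter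
      (fun t => t.2.1 == 1 && !(t.2.2 == 1))).map (fun t => t.1)
  let ends := ((PySem.List.enumerate (current_bitarray.zip nxt) 0).filter
      (fun t => t.2.1 == 1 && !(t.2.2 == 1))).map (fun t => t.1)
  let alloc := (starts.zip ends).map (fun p => [p.1, p.2 - p.1 + 1])
  PySem.List.sorted alloc (fun x => PySem.List.pyGetD x 1 0) true

-- ===== PRECONDITION & SPEC =====
def Spec_get_sorted_alloc_list (current_bitarray : List Int) (out : List (List Int)) : Prop := out = get_sorted_alloc_list_alt current_bitarray
instance (current_bitarray : List Int) (out : List (List Int)) : Decidable (Spec_get_sorted_alloc_list current_bitarray out) := by unfold Spec_get_sorted_alloc_list; infer_instance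

-- ===== CLAIM (what is proved, stated in full; the proofs are below) =====
def Claim_equal_get_sorted_alloc_list : Prop := ∀ (current_bitarray : List Int), Dom_get_sorted_alloc_list current_bitarray → Spec_get_sorted_alloc_list current_bitarray (get_sorted_alloc_list current_bitarray)

-- ===== LEMMAS AND PROOFS =====

-- canonical run list: (start index, length) of each maximal run of 1s
def pvRuns : List Int → Int → List (Int × Int)
  | [], _ => []
  | v :: rest, i =>
    if v == 1 then
      (i, 1 + ((rest.takeWhile (fun y => y == 1)).length : Int)) ::
        pvRuns (rest.dropWhile (fun y => y == 1)) (i + 1 + (rest.takeWhile (fun y => y == 1)).length)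
    else pvRuns rest (i + 1)
termination_by xs _ => xs.length
decreasing_by
  · simp only [List.length_cons]
    exact Nat.lt_succ_of_le (List.length_dropWhile_le _ _)
  · simp

-- A's per-group accumulation as a named function
def pvAllocA (gs : List (Bool × List (Int × Int))) (acc : List (List Int)) : List (List Int) :=
  gs.foldl
    (fun acc kg =>
      if kg.1 then acc ++ [[(PySem.List.pyGetD kg.2 0 (0, 0)).1, (kg.2.length : Int)]]
      else acc) acc

-- B's start scan as structural recursion (p = previous bit carry)
def pvS : List Int → Int → Int → List Int
  | [], _, _ => []
  | v :: rest, p, i => (if v == 1 && !(p == 1) then [i] else []) ++ pvS rest v (i + 1)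

-- B's end scan as structural recursion (next bit is the head of the tail, 0 at the end)
def pvE : List Int → Int → List Int
  | [], _ => []
  | v :: rest, i => (if v == 1 && !(rest.headD 0 == 1) then [i] else []) ++ pvE rest (i + 1)

lemma pvEnum_takeWhile (p : Int → Bool) :
    ∀ (xs : List Int) (i : Int),
    (PySem.List.enumerate xs i).takeWhile (fun y => p y.2) =
      PySem.List.enumerate (xs.takeWhile p) i := by
  intro xs
  induction xs with
  | nil => intro i; simp [PySem.List.enumerate_nil]
  | cons x rest ih =>
    intro i
    by_cases hx : p x
    · simp [PySem.List.enumerate_cons, hx, ih]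
    · simp [PySem.List.enumerate_cons, hx]

lemma pvEnum_dropWhile (p : Int → Bool) :
    ∀ (xs : List Int) (i : Int),
    (PySem.List.enumerate xs i).dropWhile (fun y => p y.2) =
      PySem.List.enumerate (xs.dropWhile p) (i + (xs.takeWhile p).length) := by
  intro xs
  induction xs with
  | nil => intro i; simp [PySem.List.enumerate_nil]
  | cons x rest ih =>
    intro i
    by_cases hx : p x
    · rw [PySem.List.enumerate_cons]
      rw [List.dropWhile_cons_of_pos (by simpa using hx), List.dropWhile_cons_of_pos (by simpa using hx)]
      rw [ih (i + 1)]
      rw [List.takeWhile_cons_of_pos (by simpa using hx)]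
      simp only [List.length_cons]
      push_cast
      ring_nf
    · rw [PySem.List.enumerate_cons]
      rw [List.dropWhile_cons_of_neg (by simpa using hx), List.dropWhile_cons_of_neg (by simpa using hx)]
      rw [List.takeWhile_cons_of_neg (by simpa using hx)]
      simp [PySem.List.enumerate_cons]

-- pvRuns skips a prefix of non-1s
lemma pvRuns_skip : ∀ (t : List Int), (∀ y ∈ t, ¬ y = 1) → ∀ (d : List Int) (i : Int),
    pvRuns (t ++ d) i = pvRuns d (i + t.length) := by
  intro t
  induction t with
  | nil => intro _ d i; simp
  | cons w ws ih =>
    intro h d i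
    have hw : ¬ w = 1 := h w (by simp)
    rw [List.cons_append, pvRuns]
    simp only [beq_iff_eq, hw, if_false]
    rw [ih (fun y hy => h y (List.mem_cons_of_mem _ hy)) d (i + 1)]
    simp only [List.length_cons]
    push_cast
    ring_nf

-- ===== A-side: the groupby fold computes pvRuns =====
lemma pvMainA : ∀ (n : Nat) (xs : List Int), xs.length ≤ n → ∀ (i : Int) (acc : List (List Int)),
    pvAllocA (pvGroupsA (PySem.List.enumerate xs i)) acc =
      acc ++ (pvRuns xs i).map (fun p => [p.1, p.2]) := by
  intro n
  induction n with
  | zero =>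
    intro xs hlen i acc
    have : xs = [] := List.eq_nil_of_length_eq_zero (Nat.le_zero.mp hlen)
    subst this
    simp [PySem.List.enumerate_nil, pvGroupsA, pvAllocA, pvRuns]
  | succ n ih =>
    intro xs hlen i acc
    match xs with
    | [] => simp [PySem.List.enumerate_nil, pvGroupsA, pvAllocA, pvRuns]
    | v :: rest =>
      rw [PySem.List.enumerate_cons]
      by_cases hv : v = 1
      · subst hv
        rw [pvGroupsA]
        simp only [beq_self_eq_true]
        have hTW : (PySem.List.enumerate rest (i + 1)).takeWhile (fun y => (y.2 == 1) == true) =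
            PySem.List.enumerate (rest.takeWhile (fun y => y == 1)) (i + 1) := by
          rw [show (fun (y : Int × Int) => (y.2 == 1) == true) = (fun y => (fun z => z == 1) y.2) by
            funext y; simp]
          exact pvEnum_takeWhile (fun z => z == 1) rest (i + 1)
        have hDW : (PySem.List.enumerate rest (i + 1)).dropWhile (fun y => (y.2 == 1) == true) =
            PySem.List.enumerate (rest.dropWhile (fun y => y == 1))
              (i + 1 + (rest.takeWhile (fun y => y == 1)).length) := by
          rw [show (fun (y : Int × Int) => (y.2 == 1) == true) = (fun y => (fun z => z == 1) y.2) by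
            funext y; simp]
          exact pvEnum_dropWhile (fun z => z == 1) rest (i + 1)
        rw [hTW, hDW]
        rw [pvAllocA]
        simp only [List.foldl_cons, if_true]
        have hgd : (rest.dropWhile (fun y => y == 1)).length ≤ n := by
          have h1 := List.length_dropWhile_le (fun y : Int => y == 1) rest
          have h2 : rest.length + 1 ≤ n + 1 := by simpa using hlen
          omega
        have := ih (rest.dropWhile (fun y => y == 1)) hgd
          (i + 1 + (rest.takeWhile (fun y => y == 1)).length)
          (acc ++ [[(PySem.List.pyGetD
              ((i, (1:Int)) :: PySem.List.enumerate (rest.takeWhile (fun y => y == 1)) (i + 1)) 0 (0, 0)).1,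
            (((i, (1:Int)) :: PySem.List.enumerate (rest.takeWhile (fun y => y == 1)) (i + 1)).length : Int)]])
        rw [pvAllocA] at this
        rw [this]
        rw [pvRuns]
        simp only [beq_self_eq_true, if_true, List.map_cons, PySem.List.pyGetD_zero_cons,
          List.length_cons, PySem.List.length_enumerate, List.append_assoc]
        push_cast
        ring_nf
        simp
      · have hvf : (v == 1) = false := by simpa using hv
        rw [pvGroupsA]
        simp only [hvf]
        rw [pvAllocA]
        simp only [List.foldl_cons, Bool.false_eq_true, if_false]
        have hDW : (PySem.List.enumerate rest (i + 1)).dropWhile (fun y => (y.2 == 1) == false) =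
            PySem.List.enumerate (rest.dropWhile (fun y => (y == 1) == false))
              (i + 1 + (rest.takeWhile (fun y => (y == 1) == false)).length) := by
          rw [show (fun (y : Int × Int) => (y.2 == 1) == false) = (fun y => (fun z => (z == 1) == false) y.2) by
            funext y; rfl]
          exact pvEnum_dropWhile (fun z => (z == 1) == false) rest (i + 1)
        rw [hDW]
        have hgd : (rest.dropWhile (fun y => (y == 1) == false)).length ≤ n := by
          have h1 := List.length_dropWhile_le (fun y : Int => (y == 1) == false) rest
          have h2 : rest.length + 1 ≤ n + 1 := by simpa using hlen
          omega
        have hihn := ih (rest.dropWhile (fun y => (y == 1) == false)) hgd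
          (i + 1 + (rest.takeWhile (fun y => (y == 1) == false)).length) acc
        rw [pvAllocA] at hihn
        rw [hihn]
        rw [pvRuns]
        simp only [beq_iff_eq, hv, if_false]
        have hsplit : rest = rest.takeWhile (fun y => (y == 1) == false) ++
            rest.dropWhile (fun y => (y == 1) == false) := (List.takeWhile_append_dropWhile).symm
        conv_rhs => rw [hsplit]
        rw [pvRuns_skip _ (fun y hy => by simpa using List.mem_takeWhile_imp hy) _ (i + 1)]

-- ===== B-side bridges: the filtered enumerate scans are pvS / pvE =====
lemma pvZip_dropLast (v : Int) (rest : List Int) :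
    rest.zip ((v :: rest).dropLast) = rest.zip (v :: rest.dropLast) := by
  cases rest with
  | nil => simp
  | cons r rs => rfl

lemma pvZipS : ∀ (xs : List Int) (p i : Int),
    ((PySem.List.enumerate (xs.zip (p :: xs.dropLast)) i).filter
      (fun t => t.2.1 == 1 && !(t.2.2 == 1))).map (fun t => t.1) = pvS xs p i := by
  intro xs
  induction xs with
  | nil => intro p i; simp [PySem.List.enumerate_nil, pvS]
  | cons v rest ih =>
    intro p i
    rw [show (v :: rest).zip (p :: (v :: rest).dropLast) =
        (v, p) :: rest.zip (v :: rest.dropLast) by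
      rw [List.zip_cons_cons, pvZip_dropLast]]
    rw [PySem.List.enumerate_cons, pvS]
    by_cases hc : (v == 1 && !(p == 1)) = true
    · rw [List.filter_cons_of_pos (by simpa using hc)]
      rw [List.map_cons, ih v (i + 1), hc]
      simp
    · rw [List.filter_cons_of_neg (by simpa using hc)]
      rw [ih v (i + 1)]
      rw [Bool.not_eq_true] at hc
      rw [hc]
      simp

lemma pvZip_tail (v : Int) (rest : List Int) :
    (v :: rest).zip (rest ++ [0]) = (v, rest.headD 0) :: rest.zip (rest.tail ++ [0]) := by
  cases rest with
  | nil => simp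
  | cons r rs => rfl

lemma pvZipE : ∀ (xs : List Int) (i : Int),
    ((PySem.List.enumerate (xs.zip (xs.tail ++ [0])) i).filter
      (fun t => t.2.1 == 1 && !(t.2.2 == 1))).map (fun t => t.1) = pvE xs i := by
  intro xs
  induction xs with
  | nil => intro i; simp [PySem.List.enumerate_nil, pvE]
  | cons v rest ih =>
    intro i
    rw [show (v :: rest).tail = rest from rfl, pvZip_tail]
    rw [PySem.List.enumerate_cons, pvE]
    by_cases hc : (v == 1 && !(rest.headD 0 == 1)) = true
    · rw [List.filter_cons_of_pos (by simpa using hc)]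
      rw [List.map_cons, ih (i + 1), hc]
      simp
    · rw [List.filter_cons_of_neg (by simpa using hc)]
      rw [ih (i + 1)]
      rw [Bool.not_eq_true] at hc
      rw [hc]
      simp

-- carry only matters through 'p == 1'
lemma pvS_carry (xs : List Int) (p q i : Int) (h : (p == 1) = (q == 1)) :
    pvS xs p i = pvS xs q i := by
  cases xs with
  | nil => rfl
  | cons v rest => simp [pvS, h]

-- the carry 1 is irrelevant when the list does not start with a 1
lemma pvS_head_ne (d : List Int) (j : Int) (hd : (d.headD 0 == 1) = false) :
    pvS d 1 j = pvS d 0 j := by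
  cases d with
  | nil => rfl
  | cons z zs =>
    simp only [List.headD_cons] at hd
    simp [pvS, hd]

-- inside a run of 1s no start is emitted
lemma pvS_run : ∀ (t : List Int), (∀ y ∈ t, y = 1) → ∀ (d : List Int) (i : Int),
    pvS (t ++ d) 1 i = pvS d 1 (i + t.length) := by
  intro t
  induction t with
  | nil => intro _ d i; simp
  | cons w ws ih =>
    intro h d i
    have hw : w = 1 := h w (by simp)
    subst hw
    rw [List.cons_append, pvS]
    simp only [beq_self_eq_true, Bool.not_true, Bool.and_false]
    rw [ih (fun y hy => h y (List.mem_cons_of_mem _ hy)) d (i + 1)]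
    simp only [List.length_cons]
    push_cast
    ring_nf
    simp

-- a run of 1s emits exactly its last index as an end
lemma pvE_run : ∀ (t : List Int), (∀ y ∈ t, y = 1) → ∀ (d : List Int) (i : Int),
    (d.headD 0 == 1) = false →
    pvE ((1 : Int) :: (t ++ d)) i = (i + t.length) :: pvE d (i + t.length + 1) := by
  intro t
  induction t with
  | nil =>
    intro _ d i hd
    rw [List.nil_append, pvE, hd]
    simp
  | cons w ws ih =>
    intro h d i hd
    have hw : w = 1 := h w (by simp)
    subst hw
    rw [pvE]
    simp only [List.cons_append, List.headD_cons, beq_self_eq_true, Bool.not_true,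
      Bool.and_false]
    rw [ih (fun y hy => h y (List.mem_cons_of_mem _ hy)) d (i + 1) hd]
    simp only [List.length_cons]
    push_cast
    ring_nf
    simp

-- ===== B-side: zipping starts with ends computes pvRuns =====
lemma pvMainB : ∀ (n : Nat) (xs : List Int), xs.length ≤ n → ∀ (i : Int),
    ((pvS xs 0 i).zip (pvE xs i)).map (fun p => [p.1, p.2 - p.1 + 1]) =
      (pvRuns xs i).map (fun p => [p.1, p.2]) := by
  intro n
  induction n with
  | zero =>
    intro xs hlen i
    have : xs = [] := List.eq_nil_of_length_eq_zero (Nat.le_zero.mp hlen)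
    subst this
    simp [pvS, pvE, pvRuns]
  | succ n ih =>
    intro xs hlen i
    match xs with
    | [] => simp [pvS, pvE, pvRuns]
    | v :: rest =>
      by_cases hv : v = 1
      · subst hv
        have hsplit : rest = rest.takeWhile (fun y => y == 1) ++
            rest.dropWhile (fun y => y == 1) := (List.takeWhile_append_dropWhile).symm
        have ht : ∀ y ∈ rest.takeWhile (fun y : Int => y == 1), y = 1 := by
          intro y hy
          simpa using List.mem_takeWhile_imp hy
        have hd : ((rest.dropWhile (fun y : Int => y == 1)).headD 0 == 1) = false := by
          match hr : rest.dropWhile (fun y : Int => y == 1) with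
          | [] => simp
          | z :: zs =>
            have h := List.head_dropWhile_not (fun y : Int => y == 1) (l := rest)
              (by rw [hr]; simp)
            simp only [hr, List.head_cons] at h
            simpa using h
        have hS : pvS ((1 : Int) :: rest) 0 i =
            i :: pvS (rest.dropWhile (fun y => y == 1))
              0 (i + 1 + ((rest.takeWhile (fun y => y == 1)).length : Int)) := by
          rw [pvS]
          rw [show ((1 : Int) == 1 && !((0 : Int) == 1)) = true from by decide]
          conv_lhs => rw [hsplit]
          rw [pvS_run _ ht _ (i + 1), pvS_head_ne _ _ hd]
          simp
        have hE : pvE ((1 : Int) :: rest) i =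
            (i + ((rest.takeWhile (fun y => y == 1)).length : Int)) ::
              pvE (rest.dropWhile (fun y => y == 1))
                (i + ((rest.takeWhile (fun y => y == 1)).length : Int) + 1) := by
          conv_lhs => rw [hsplit]
          exact pvE_run _ ht _ i hd
        have hgd : (rest.dropWhile (fun y : Int => y == 1)).length ≤ n := by
          have h1 := List.length_dropWhile_le (fun y : Int => y == 1) rest
          have h2 : rest.length + 1 ≤ n + 1 := by simpa using hlen
          omega
        rw [hS, hE]
        rw [show i + 1 + ((rest.takeWhile (fun y : Int => y == 1)).length : Int) =
            i + ((rest.takeWhile (fun y : Int => y == 1)).length : Int) + 1 from by ring]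
        rw [List.zip_cons_cons, List.map_cons, ih _ hgd]
        rw [pvRuns]
        simp only [beq_self_eq_true, if_true, List.map_cons]
        rw [show i + 1 + ((rest.takeWhile (fun y : Int => y == 1)).length : Int) =
            i + ((rest.takeWhile (fun y : Int => y == 1)).length : Int) + 1 from by ring]
        rw [show (i + ((rest.takeWhile (fun y : Int => y == 1)).length : Int)) - i + 1 =
            1 + ((rest.takeWhile (fun y : Int => y == 1)).length : Int) from by ring]
      · have hvf : (v == 1) = false := by simpa using hv
        have hS : pvS (v :: rest) 0 i = pvS rest 0 (i + 1) := by
          rw [pvS, hvf]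
          simpa using pvS_carry rest v 0 (i + 1) (by simp [hvf])
        have hE : pvE (v :: rest) i = pvE rest (i + 1) := by
          rw [pvE, hvf]
          simp
        have hgd : rest.length ≤ n := by
          have : rest.length + 1 ≤ n + 1 := by simpa using hlen
          omega
        rw [hS, hE, ih _ hgd, pvRuns]
        rw [hvf]
        simp

-- ===== VERDICT (by name: the statement is the Claim_ definition above) =====
theorem get_sorted_alloc_list_spec : Claim_equal_get_sorted_alloc_list := by
  intro xs _
  unfold Spec_get_sorted_alloc_list
  simp only [get_sorted_alloc_list, get_sorted_alloc_list_alt,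
    PySem.List.slice_to_neg_one, PySem.List.slice_from_one]
  have hA := pvMainA xs.length xs le_rfl 0 []
  rw [pvAllocA] at hA
  rw [hA, pvZipS xs 0 0, pvZipE xs 0, pvMainB xs.length xs le_rfl 0]
  simp
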